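-- pv_equiv track=rewrite | github.com/BigBaz54/advent_of_code_2023 | python/day12/puzzle2/damage_arrangements.py | positions_of_first_damaged_block
-- ===== SOURCE A (Python) =====
-- def positions_of_first_damaged_block(row):
--     springs = row[0]
--     block_positions = []
--     for i, s in enumerate(springs):
--         if s in '?.' and len(block_positions) != 0:
--             return block_positions
--         if s == '#':
--             block_positions.append(i)
--     return block_positions
-- ===== SOURCE B (Python) =====
-- def positions_of_first_damaged_block(row):
--     springs = row[0]
--     start = next((i for i, c in enumerate(springs) if c == '#'), None)
--     if start is None:
--         return []
--     tail = springs[start:]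
--     off = next((j for j, c in enumerate(tail) if c in '?.'), None)
--     end = len(springs) if off is None else start + off
--     return [start + j for j, c in enumerate(tail[:end - start]) if c == '#']
-- ===== Notes on version B (the rewrite author's own statement) =====
-- stated objective: alternative
-- what changed: B first locates the block boundaries (first '#', then the first '?'/'.' at or after it) and then emits the '#' indices of that window with one comprehension, instead of A's single accumulate-and-early-return loop.
import Mathlib
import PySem

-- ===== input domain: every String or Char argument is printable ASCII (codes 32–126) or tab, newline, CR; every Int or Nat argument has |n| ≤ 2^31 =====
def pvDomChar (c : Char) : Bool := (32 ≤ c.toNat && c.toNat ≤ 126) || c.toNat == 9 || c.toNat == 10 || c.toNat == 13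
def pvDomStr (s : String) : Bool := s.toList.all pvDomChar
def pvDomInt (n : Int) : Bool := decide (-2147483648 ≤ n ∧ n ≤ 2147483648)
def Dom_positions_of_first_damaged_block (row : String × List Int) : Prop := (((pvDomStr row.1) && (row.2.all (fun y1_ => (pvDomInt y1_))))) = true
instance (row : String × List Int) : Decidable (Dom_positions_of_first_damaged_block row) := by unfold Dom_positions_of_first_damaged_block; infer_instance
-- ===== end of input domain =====

-- B finds the block boundaries first, then emits the '#' indices of that window (alternative decomposition; return value only).

-- ===== PORT A =====
-- the for-loop over enumerate(springs) with accumulator and early return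
def pfdGoA : List Char → Int → List Int → List Int
  | [], _, acc => acc
  | c :: r, i, acc =>
    if (c == '?' || c == '.') && !acc.isEmpty then acc
    else if c == '#' then pfdGoA r (i+1) (acc ++ [i])
    else pfdGoA r (i+1) acc

def positions_of_first_damaged_block (row : String × List Int) : List Int :=
  pfdGoA row.1.toList 0 []

-- ===== PORT B =====
-- next((i for i, c in enumerate(..) if p c), None): first index satisfying p
def pfdFind (p : Char → Bool) : List Char → Int → Option Int
  | [], _ => none
  | c :: r, i => if p c then some i else pfdFind p r (i+1)

-- [base + j for j, c in enumerate(w) if c == '#']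
def pfdEmit : List Char → Int → List Int
  | [], _ => []
  | c :: r, i => if c == '#' then i :: pfdEmit r (i+1) else pfdEmit r (i+1)

def positions_of_first_damaged_block_alt (row : String × List Int) : List Int :=
  let cs := row.1.toList
  match pfdFind (fun c => c == '#') cs 0 with
  | none => []
  | some start =>
    let t := cs.drop start.toNat
    let stop : Int := match pfdFind (fun c => c == '?' || c == '.') t 0 with
      | none => (cs.length : Int)
      | some off => start + off
    pfdEmit (t.take (stop - start).toNat) start

-- ===== PRECONDITION & SPEC =====
def Spec_positions_of_first_damaged_block (row : String × List Int) (out : List Int) : Prop := out = positions_of_first_damaged_block_alt row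
instance (row : String × List Int) (out : List Int) : Decidable (Spec_positions_of_first_damaged_block row out) := by unfold Spec_positions_of_first_damaged_block; infer_instance

-- ===== CLAIM (what is proved, stated in full; the proofs are below) =====
def Claim_equal_positions_of_first_damaged_block : Prop := ∀ (row : String × List Int), Dom_positions_of_first_damaged_block row → Spec_positions_of_first_damaged_block row (positions_of_first_damaged_block row)

-- ===== LEMMAS AND PROOFS =====

-- '#' indices before the first terminator ('?' or '.')
def pfdCollect : List Char → Int → List Int
  | [], _ => []
  | c :: r, i =>
    if c == '?' || c == '.' then []
    else if c == '#' then i :: pfdCollect r (i+1)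
    else pfdCollect r (i+1)

-- relative index of the first terminator (list length if none)
def pfdTermIdx : List Char → Nat
  | [] => 0
  | c :: r => if c == '?' || c == '.' then 0 else pfdTermIdx r + 1

lemma pfdGoA_ne (cs : List Char) : ∀ (i : Int) (acc : List Int), acc ≠ [] →
    pfdGoA cs i acc = acc ++ pfdCollect cs i := by
  induction cs with
  | nil => intro i acc _; simp [pfdGoA, pfdCollect]
  | cons c r ih =>
    intro i acc hacc
    by_cases ht : (c == '?' || c == '.') = true
    · simp [pfdGoA, pfdCollect, ht, hacc]
    · have hne : c ≠ '?' ∧ c ≠ '.' := by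
        constructor <;> intro h <;> simp [h] at ht
      by_cases hh : c = '#'
      · simp [pfdGoA, pfdCollect, hh, ih (i+1) (acc ++ [i]) (by simp)]
      · simp [pfdGoA, pfdCollect, ht, hh, ih (i+1) acc hacc]

lemma pfdFind_bounds (p : Char → Bool) (cs : List Char) : ∀ (b s : Int),
    pfdFind p cs b = some s → b ≤ s ∧ (s - b).toNat < cs.length := by
  induction cs with
  | nil => intro b s h; simp [pfdFind] at h
  | cons c r ih =>
    intro b s h
    by_cases hp : p c = true
    · simp [pfdFind, hp] at h; subst h; simp only [List.length_cons]; omega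
    · simp [pfdFind, hp] at h
      have := ih (b+1) s h
      simp only [List.length_cons]; omega

lemma pfdFind_term (cs : List Char) : ∀ (b : Int),
    pfdFind (fun c => c == '?' || c == '.') cs b =
      if pfdTermIdx cs < cs.length then some (b + pfdTermIdx cs) else none := by
  induction cs with
  | nil => intro b; simp [pfdFind, pfdTermIdx]
  | cons c r ih =>
    intro b
    by_cases ht : (c == '?' || c == '.') = true
    · simp [pfdFind, pfdTermIdx, ht]
    · simp only [pfdFind, pfdTermIdx, ht]
      rw [ih (b+1)]
      by_cases h : pfdTermIdx r < r.length
      · simp [h]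
        omega
      · simp [h]
        try omega

lemma pfdTermIdx_le (cs : List Char) : pfdTermIdx cs ≤ cs.length := by
  induction cs with
  | nil => simp [pfdTermIdx]
  | cons c r ih =>
    by_cases h : (c == '?' || c == '.') = true
    · simp [pfdTermIdx, h]
    · simp [pfdTermIdx, h]
      omega

lemma pfdEmit_take (cs : List Char) : ∀ (b : Int),
    pfdEmit (cs.take (pfdTermIdx cs)) b = pfdCollect cs b := by
  induction cs with
  | nil => intro b; simp [pfdEmit, pfdCollect, pfdTermIdx]
  | cons c r ih =>
    intro b
    by_cases ht : (c == '?' || c == '.') = true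
    · simp [pfdTermIdx, pfdCollect, ht, pfdEmit]
    · have hne : c ≠ '?' ∧ c ≠ '.' := by
        constructor <;> intro h <;> simp [h] at ht
      by_cases hh : c = '#'
      · simp [pfdTermIdx, pfdCollect, ht, pfdEmit, List.take_succ_cons, ih (b+1), hh]
      · simp [pfdTermIdx, pfdCollect, pfdEmit, List.take_succ_cons, ih (b+1), hh, hne.1, hne.2]

lemma pfdGoA_nil (cs : List Char) : ∀ (i : Int),
    pfdGoA cs i [] =
      match pfdFind (fun c => c == '#') cs i with
      | none => []
      | some s => pfdCollect (cs.drop (s - i).toNat) s := by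
  induction cs with
  | nil => intro i; simp [pfdGoA, pfdFind]
  | cons c r ih =>
    intro i
    by_cases hh : c = '#'
    · subst hh
      rw [show pfdGoA ('#' :: r) i [] = pfdGoA r (i+1) [i] from by simp [pfdGoA]]
      rw [pfdGoA_ne r (i+1) [i] (by simp)]
      simp [pfdFind, pfdCollect]
    · have hfind : pfdFind (fun c => c == '#') (c :: r) i = pfdFind (fun c => c == '#') r (i+1) := by
        simp [pfdFind, hh]
      have hgo : pfdGoA (c :: r) i [] = pfdGoA r (i+1) [] := by
        by_cases ht : (c == '?' || c == '.') = true
        · simp [pfdGoA, ht, hh]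
        · simp [pfdGoA, ht, hh]
      rw [hgo, hfind, ih (i+1)]
      cases hf : pfdFind (fun c => c == '#') r (i+1) with
      | none => simp
      | some s =>
        have hb := pfdFind_bounds _ r (i+1) s hf
        have hdrop : (c :: r).drop (s - i).toNat = r.drop (s - (i+1)).toNat := by
          have : (s - i).toNat = (s - (i+1)).toNat + 1 := by omega
          simp [this]
        simp [hdrop]

-- ===== VERDICT (by name: the statement is the Claim_ definition above) =====
theorem positions_of_first_damaged_block_spec : Claim_equal_positions_of_first_damaged_block := by
  intro row _
  unfold Spec_positions_of_first_damaged_block positions_of_first_damaged_block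
    positions_of_first_damaged_block_alt
  rw [pfdGoA_nil row.1.toList 0]
  cases hf : pfdFind (fun c => c == '#') row.1.toList 0 with
  | none => simp only [hf]
  | some start =>
    simp only [hf]
    have hb := pfdFind_bounds (fun c => c == '#') row.1.toList 0 start hf
    rw [pfdFind_term]
    have hterm := pfdTermIdx_le (row.1.toList.drop start.toNat)
    have htlen : (row.1.toList.drop start.toNat).length = row.1.toList.length - start.toNat := by
      simp
    by_cases h : pfdTermIdx (row.1.toList.drop start.toNat) < (row.1.toList.drop start.toNat).length
    · rw [if_pos h]
      have h1 : (start + ((0 : Int) + (pfdTermIdx (row.1.toList.drop start.toNat) : Int)) - start).toNat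
          = pfdTermIdx (row.1.toList.drop start.toNat) := by omega
      rw [h1, pfdEmit_take]
      have h2 : (start - 0).toNat = start.toNat := by omega
      rw [h2]
    · rw [if_neg h]
      have h1 : ((row.1.toList.length : Int) - start).toNat
          = pfdTermIdx (row.1.toList.drop start.toNat) := by omega
      rw [h1, pfdEmit_take]
      have h2 : (start - 0).toNat = start.toNat := by omega
      rw [h2]
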